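-- pv_equiv track=rewrite | github.com/baobaomi900901/MyShell | Windows/Win_general/cd.py | show_help
-- ===== SOURCE A (Python) =====
-- YELLOW = '\033[93m'
--
-- RESET = '\033[0m'
--
-- def show_help(config):
--     """Print available directories with colored names and aligned columns."""
--     lines = []
--     lines.append("快速目录跳转")
--     lines.append("用法: cd_ <名称>")
--     lines.append("")
--     lines.append("可用目录:")
--
--     # Collect directory names to determine max width
--     names = []
--     for key, value in config.items():
--         if value.get('win') is not None:
--             display_name = key.replace('_', '-')
--             names.append(display_name)
--     max_len = max(len(name) for name in names) if names else 0
--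
--     # Generate lines with colored names
--     for key, value in config.items():
--         if value.get('win') is not None:
--             display_name = key.replace('_', '-')
--             description = value.get('description', '')
--             # Yellow name, padded to max_len, then description
--             line = f"  {YELLOW}{display_name:<{max_len}}{RESET} - {description}"
--             lines.append(line)
--     return "\n".join(lines)
-- ===== SOURCE B (Python) =====
-- YELLOW = '\033[93m'
--
-- RESET = '\033[0m'
--
-- def show_help(config):
--     """Print available directories with colored names and aligned columns."""
--     # Single pass over config: keep a running maximum of the name widths and a
--     # list of deferred formatters (repmin-style); the width is only plugged in
--     # once the whole dict has been seen, so config is never scanned twice.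
--     max_len = 0
--     renderers = []
--     for key, value in config.items():
--         if value.get('win') is not None:
--             name = key.replace('_', '-')
--             desc = value.get('description', '')
--             if len(name) > max_len:
--                 max_len = len(name)
--             renderers.append(lambda w, n=name, d=desc: f"  {YELLOW}{n:<{w}}{RESET} - {d}")
--     lines = ["快速目录跳转", "用法: cd_ <名称>", "", "可用目录:"]
--     for render in renderers:
--         lines.append(render(max_len))
--     return "\n".join(lines)
-- ===== Notes on version B (the rewrite author's own statement) =====
-- stated objective: alternative
-- what changed: B replaces A's two separate scans of config by a single repmin-style pass that maintains a running maximum width together with a list of deferred formatting closures, then applies the final width to each closure; A instead collects the names, takes max() over them, and re-scans config to format.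
import Mathlib
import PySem

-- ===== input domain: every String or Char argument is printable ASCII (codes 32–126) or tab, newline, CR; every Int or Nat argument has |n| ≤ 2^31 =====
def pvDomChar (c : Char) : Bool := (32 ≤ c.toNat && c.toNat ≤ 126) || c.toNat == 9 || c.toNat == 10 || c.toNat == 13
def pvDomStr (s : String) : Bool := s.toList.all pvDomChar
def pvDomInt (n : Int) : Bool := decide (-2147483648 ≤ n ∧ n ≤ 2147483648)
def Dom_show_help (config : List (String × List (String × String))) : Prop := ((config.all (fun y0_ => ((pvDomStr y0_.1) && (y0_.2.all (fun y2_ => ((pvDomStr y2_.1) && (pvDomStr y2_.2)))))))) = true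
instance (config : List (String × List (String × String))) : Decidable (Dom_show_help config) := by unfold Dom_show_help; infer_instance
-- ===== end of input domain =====

-- B replaces A's two scans of config by a single repmin-style pass keeping a running maximum
-- width plus deferred formatting closures that receive the final width afterwards (objective:
-- alternative). Both ports read the association lists through PySem.Dict.ofList, i.e. with
-- Python's dict semantics (duplicate keys: first position, last value), exactly as in Python.

-- ===== PORT A =====
def pvYELLOW : String := "\x1B[93m"
def pvRESET : String := "\x1B[0m"

def show_help (config : List (String × List (String × String))) : String :=
  let d := PySem.Dict.ofList config
  let lines : List String := ["快速目录跳转", "用法: cd_ <名称>", "", "可用目录:"]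
  let names : List String := d.items.foldl (fun ns kv =>
      if ((PySem.Dict.ofList kv.2).get? "win").isSome then
        ns ++ [PySem.Str.replace kv.1 "_" "-"]
      else ns) []
  -- max(len(name) for name in names) if names else 0  (none exactly when names is empty)
  let max_len : Int := (PySem.List.max? (names.map PySem.Str.len) (fun y => y)).getD 0
  let lines := d.items.foldl (fun ls kv =>
      if ((PySem.Dict.ofList kv.2).get? "win").isSome then
        let dn := PySem.Str.replace kv.1 "_" "-"
        let desc := (PySem.Dict.ofList kv.2).getD "description" ""
        -- f"  {YELLOW}{dn:<{max_len}}{RESET} - {desc}" : left-justify by space padding (exact for these ASCII names)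
        ls ++ ["  " ++ pvYELLOW ++ dn ++ String.mk (List.replicate (max_len - PySem.Str.len dn).toNat ' ') ++ pvRESET ++ " - " ++ desc]
      else ls) lines
  PySem.Str.join "\n" lines

-- ===== PORT B =====
-- the closure appended for one accepted entry (its name and description are captured; the width comes later)
def pvRender (name desc : String) : Int → String := fun w =>
  "  " ++ pvYELLOW ++ name ++ String.mk (List.replicate (w - PySem.Str.len name).toNat ' ') ++ pvRESET ++ " - " ++ desc

def show_help_alt (config : List (String × List (String × String))) : String :=
  let d := PySem.Dict.ofList config
  -- one pass: running maximum width + deferred formatters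
  let st : Int × List (Int → String) := d.items.foldl (fun st kv =>
      if ((PySem.Dict.ofList kv.2).get? "win").isSome then
        let name := PySem.Str.replace kv.1 "_" "-"
        let desc := (PySem.Dict.ofList kv.2).getD "description" ""
        let m := if PySem.Str.len name > st.1 then PySem.Str.len name else st.1
        (m, st.2 ++ [pvRender name desc])
      else st) (0, [])
  let lines := st.2.foldl (fun ls r => ls ++ [r st.1])
      ["快速目录跳转", "用法: cd_ <名称>", "", "可用目录:"]
  PySem.Str.join "\n" lines

-- ===== PRECONDITION & SPEC =====
def Spec_show_help (config : List (String × List (String × String))) (out : String) : Prop := out = show_help_alt config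
instance (config : List (String × List (String × String))) (out : String) : Decidable (Spec_show_help config out) := by unfold Spec_show_help; infer_instance

-- ===== CLAIM =====
def Claim_equal_show_help : Prop := ∀ (config : List (String × List (String × String))), Dom_show_help config → Spec_show_help config (show_help config)

-- ===== LEMMAS AND PROOFS =====
-- the filter and the name/description extraction both ports share
def pvOk (kv : String × List (String × String)) : Bool := ((PySem.Dict.ofList kv.2).get? "win").isSome
def pvName (kv : String × List (String × String)) : String := PySem.Str.replace kv.1 "_" "-"
def pvDesc (kv : String × List (String × String)) : String := (PySem.Dict.ofList kv.2).getD "description" ""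

-- B's single pass, characterised: running max of the accepted widths, closures in order
theorem b_fold_char (l : List (String × List (String × String))) (m0 : Int) (acc : List (Int → String)) :
    l.foldl (fun st kv =>
      if pvOk kv then
        ((if PySem.Str.len (pvName kv) > st.1 then PySem.Str.len (pvName kv) else st.1),
          st.2 ++ [pvRender (pvName kv) (pvDesc kv)])
      else st) (m0, acc)
    = (((l.filter pvOk).map (fun kv => PySem.Str.len (pvName kv))).foldl max m0,
       acc ++ (l.filter pvOk).map (fun kv => pvRender (pvName kv) (pvDesc kv))) := by
  induction l generalizing m0 acc with
  | nil => simp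
  | cons x t ih =>
    by_cases h : pvOk x
    · simp only [List.foldl_cons, h, if_pos, List.filter_cons_of_pos h, List.map_cons,
        List.foldl_cons, ih, List.append_assoc, List.singleton_append]
      congr 1
      by_cases h' : PySem.Str.len (pvName x) > m0
      · rw [if_pos h', max_eq_right (le_of_lt h')]
      · rw [if_neg h', max_eq_left (by omega)]
    · rw [List.foldl_cons, if_neg h, List.filter_cons_of_neg h]
      exact ih m0 acc

-- running max from 0 over nonnegative widths = A's `max(...) if names else 0`
theorem runmax_eq_maxD (l : List Int) (h : ∀ x ∈ l, 0 ≤ x) :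
    l.foldl max 0 = (PySem.List.max? l (fun y => y)).getD 0 := by
  cases l with
  | nil => simp [PySem.List.max?]
  | cons x t =>
    rw [PySem.List.max?_id_cons]
    simp only [List.foldl_cons, Option.getD_some]
    have hx : max 0 x = x := max_eq_right (h x (by simp))
    rw [hx]

theorem show_help_spec' (config : List (String × List (String × String))) :
    show_help config = show_help_alt config := by
  unfold show_help show_help_alt
  simp only [PySem.List.foldl_append_if, List.nil_append]
  have hb := b_fold_char (PySem.Dict.ofList config).items 0 []
  simp only [pvOk, pvName, pvDesc] at hb
  rw [hb]
  simp only [PySem.List.foldl_append_singleton_eq_map, List.nil_append]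
  have hnn : ∀ x ∈ ((((PySem.Dict.ofList config).items.filter
      (fun kv => ((PySem.Dict.ofList kv.2).get? "win").isSome)).map
      (fun kv => PySem.Str.replace kv.1 "_" "-")).map PySem.Str.len), 0 ≤ x := by
    intro x hx
    simp only [List.mem_map] at hx
    obtain ⟨kv, _, rfl⟩ := hx
    simp [PySem.Str.len_eq]
  rw [← runmax_eq_maxD _ hnn]
  simp only [List.map_map]
  apply congrArg
  apply congrArg
  apply List.map_congr_left
  intro kv _
  simp only [pvRender, Function.comp_def]
  rfl

-- ===== VERDICT =====
theorem show_help_spec : Claim_equal_show_help := by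
  intro config _
  exact show_help_spec' config
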